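-- pv_equiv track=rewrite | github.com/dshemetov/leetcode | python/problems.py | p1293
-- ===== SOURCE A (Python) =====
-- from collections import Counter, defaultdict, deque, namedtuple
-- from collections.abc import Generator
--
-- def p1293(grid: list[list[int]], k: int) -> int:
--     """
--     1293. Shortest Path in a Grid With Obstacles Elimination https://leetcode.com/problems/shortest-path-in-a-grid-with-obstacles-elimination/
--
--     Lessons learned:
--     - You don't need a dictionary of best distances, just a set of visited nodes
--     (since any first visit to a node is the best).
--     - You don't need a priority queue, just a queue.
--
--     Examples:
--     >>> p1293([[0,0,0],[1,1,0],[0,0,0],[0,1,1],[0,0,0]], 1)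
--     6
--     >>> p1293([[0,1,1],[1,1,1],[1,0,0]], 1)
--     -1
--     >>> grid = [
--     ...     [0,0,0,0,0,0,0,0,0,0],[0,1,1,1,1,1,1,1,1,0],[0,1,0,0,0,0,0,0,0,0],[0,1,0,1,1,1,1,1,1,1],[0,1,0,0,0,0,0,0,0,0],[0,1,1,1,1,1,1,1,1,0],
--     ...     [0,1,0,0,0,0,0,0,0,0],[0,1,0,1,1,1,1,1,1,1],[0,1,0,1,1,1,1,0,0,0],[0,1,0,0,0,0,0,0,1,0],[0,1,1,1,1,1,1,0,1,0],[0,0,0,0,0,0,0,0,1,0]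
--     ... ]
--     >>> p1293(grid, 1)
--     20
--     """
--     State = namedtuple("State", "steps k i j")
--     m, n = len(grid), len(grid[0])
--
--     # Trivial solution: just pick a random Manhattan distance and blow everything up.
--     if k >= m + n - 2:
--         return m + n - 2
--
--     def get_valid_neighbor_states(s: State) -> Generator[State]:
--         for di, dj in ((0, 1), (0, -1), (1, 0), (-1, 0)):
--             i, j = s.i + di, s.j + dj
--             if 0 <= i < m and 0 <= j < n:
--                 if grid[i][j] == 0:
--                     yield State(s.steps + 1, s.k, i, j)
--                 elif s.k > 0:
--                     yield State(s.steps + 1, s.k - 1, i, j)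
--
--     # Don't need a priority queue, since we're only ever visiting each node once.
--     # The states will naturally be ordered by steps.
--     queue = deque([State(0, k, 0, 0)])
--     # We can just use a set instead of a dict, since any first visit to a state has minimum steps.
--     seen = {(0, 0, k)}
--
--     while queue:
--         current_state = queue.popleft()
--
--         if (current_state.i, current_state.j) == (m - 1, n - 1):
--             return current_state.steps
--
--         for state in get_valid_neighbor_states(current_state):
--             if (state.i, state.j, state.k) not in seen:
--                 seen.add((state.i, state.j, state.k))
--                 queue.append(state)
--
--     return -1
-- ===== SOURCE B (Python) =====
-- def p1293(grid: list[list[int]], k: int) -> int: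
--     m, n = len(grid), len(grid[0])
--     if k >= m + n - 2:
--         return m + n - 2
--     # Kleene-style fixpoint iteration: reach = all states (i, j, remaining_k)
--     # reachable in <= t moves; saturate until the goal appears or the set stabilizes.
--     reach = {(0, 0, k)}
--     t = 0
--     while True:
--         if any(i == m - 1 and j == n - 1 for i, j, _ in reach):
--             return t
--         new = set(reach)
--         for i, j, kk in reach:
--             for di, dj in ((0, 1), (0, -1), (1, 0), (-1, 0)):
--                 ni, nj = i + di, j + dj
--                 if 0 <= ni < m and 0 <= nj < n:
--                     if grid[ni][nj] == 0:
--                         new.add((ni, nj, kk))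
--                     elif kk > 0:
--                         new.add((ni, nj, kk - 1))
--         if new == reach:
--             return -1
--         reach = new
--         t += 1
-- ===== Notes on version B (the rewrite author's own statement) =====
-- stated objective: alternative
-- what changed: Replaces the FIFO-queue BFS with its visited-set pruning by Kleene fixpoint iteration: B keeps one set of all states reachable in at most t moves and repeatedly saturates it with every neighbour of every member (no queue, no visited set, no per-state bookkeeping), returning t when a goal state first appears and -1 when the set stabilizes.
-- outside the precondition, e.g. on p1293([[0, 0], [1, 1], [0]], 0): A returns -1, B returns -1
import Mathlib
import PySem

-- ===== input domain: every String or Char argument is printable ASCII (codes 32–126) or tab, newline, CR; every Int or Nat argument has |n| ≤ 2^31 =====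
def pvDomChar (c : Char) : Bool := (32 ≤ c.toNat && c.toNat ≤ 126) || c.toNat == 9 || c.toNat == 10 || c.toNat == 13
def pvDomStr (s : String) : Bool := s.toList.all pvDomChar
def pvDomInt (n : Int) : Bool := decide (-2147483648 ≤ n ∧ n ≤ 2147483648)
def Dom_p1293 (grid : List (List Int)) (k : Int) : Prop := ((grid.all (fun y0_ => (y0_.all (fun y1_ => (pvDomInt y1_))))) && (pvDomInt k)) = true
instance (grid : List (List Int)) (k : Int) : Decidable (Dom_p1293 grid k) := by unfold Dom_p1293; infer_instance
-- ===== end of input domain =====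

-- B replaces A's FIFO-queue BFS (queue of State tuples + visited set) by Kleene fixpoint
-- iteration on the set of states reachable in ≤ t moves (alternative; return value only).

-- grid[i][j]; exact under Pre_p1293: both ports only call it with 0 ≤ i < len(grid),
-- 0 ≤ j < len(grid[0]) ≤ len(grid[i]), where Python raises nothing.
def pvCell (grid : List (List Int)) (i j : Int) : Int :=
  (PySem.List.pyGet? ((PySem.List.pyGet? grid i).getD []) j).getD 0

-- ===== PORT A =====
-- state tuple is Python's State(steps, k, i, j); seen keys are (i, j, k)
def p1293StepA (grid : List (List Int)) (m n : Int) (s : Int × Int × Int × Int)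
    (d : Int × Int) : Option (Int × Int × Int × Int) :=
  let i := s.2.2.1 + d.1
  let j := s.2.2.2 + d.2
  if 0 ≤ i ∧ i < m ∧ 0 ≤ j ∧ j < n then
    if pvCell grid i j = 0 then some (s.1 + 1, s.2.1, i, j)
    else if s.2.1 > 0 then some (s.1 + 1, s.2.1 - 1, i, j)
    else none
  else none

def p1293NbrsA (grid : List (List Int)) (m n : Int) (s : Int × Int × Int × Int) :
    List (Int × Int × Int × Int) :=
  [((0:Int), (1:Int)), (0, -1), (1, 0), (-1, 0)].filterMap (p1293StepA grid m n s)

def p1293PushA (acc : PySem.Set (Int × Int × Int) × List (Int × Int × Int × Int))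
    (st : Int × Int × Int × Int) :
    PySem.Set (Int × Int × Int) × List (Int × Int × Int × Int) :=
  if PySem.Set.contains acc.1 (st.2.2.1, st.2.2.2, st.2.1) then acc
  else (PySem.Set.add acc.1 (st.2.2.1, st.2.2.2, st.2.1), acc.2 ++ [st])

def p1293LoopA (grid : List (List Int)) (m n : Int) :
    Nat → List (Int × Int × Int × Int) → PySem.Set (Int × Int × Int) → Int
  | 0, _, _ => -1
  | _ + 1, [], _ => -1
  | fuel + 1, s :: rest, seen =>
    if s.2.2.1 = m - 1 ∧ s.2.2.2 = n - 1 then s.1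
    else
      let r := (p1293NbrsA grid m n s).foldl p1293PushA (seen, rest)
      p1293LoopA grid m n fuel r.2 r.1

def p1293 (grid : List (List Int)) (k : Int) : Int :=
  let m : Int := grid.length
  let n : Int := grid.headI.length   -- len(grid[0]); Pre_p1293 excludes [] where Python raises
  if k ≥ m + n - 2 then m + n - 2
  else
    -- fuel: the loop pops at most m*n*(k+1) states (each enqueued state is in seen)
    p1293LoopA grid m n (5 * (grid.length * (grid.headI.length * (k.toNat + 1))) + 2)
      [(0, k, 0, 0)] (PySem.Set.ofList [((0:Int), (0:Int), k)])

-- ===== PORT B =====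
-- the inner 'if 0 <= ni < m and 0 <= nj < n: … new.add(…)' body of Source B
def p1293AddNbB (grid : List (List Int)) (m n : Int) (acc : PySem.Set (Int × Int × Int))
    (c : Int × Int × Int) (d : Int × Int) : PySem.Set (Int × Int × Int) :=
  let i := c.1 + d.1
  let j := c.2.1 + d.2
  if 0 ≤ i ∧ i < m ∧ 0 ≤ j ∧ j < n then
    if pvCell grid i j = 0 then PySem.Set.add acc (i, j, c.2.2)
    else if c.2.2 > 0 then PySem.Set.add acc (i, j, c.2.2 - 1)
    else acc
  else acc

-- new = set(reach); for c in reach: for d in dirs: … new.add(…)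
def p1293SatStep (grid : List (List Int)) (m n : Int)
    (reach : PySem.Set (Int × Int × Int)) : PySem.Set (Int × Int × Int) :=
  reach.foldl
    (fun acc c =>
      [((0:Int), (1:Int)), (0, -1), (1, 0), (-1, 0)].foldl
        (fun a d => p1293AddNbB grid m n a c d) acc)
    reach

def p1293LoopS (grid : List (List Int)) (m n : Int) :
    Nat → PySem.Set (Int × Int × Int) → Int → Int
  | 0, _, _ => -1
  | fuel + 1, reach, t =>
    if reach.any (fun c => decide (c.1 = m - 1 ∧ c.2.1 = n - 1)) then t
    else
      let new := p1293SatStep grid m n reach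
      if PySem.Set.equal new reach then -1
      else p1293LoopS grid m n fuel new (t + 1)

def p1293_alt (grid : List (List Int)) (k : Int) : Int :=
  let m : Int := grid.length
  let n : Int := grid.headI.length
  if k ≥ m + n - 2 then m + n - 2
  else
    -- fuel: reach grows strictly each iteration among ≤ m*n*(k+1) states
    p1293LoopS grid m n (grid.length * (grid.headI.length * (k.toNat + 1)) + 2)
      (PySem.Set.ofList [((0:Int), (0:Int), k)]) 0

-- ===== PRECONDITION & SPEC =====
-- Pre_ excludes the empty grid (len(grid[0]) raises IndexError) and ragged grids (a row
-- shorter than row 0) that do not take the early-exit branch, on which A's grid[i][j] may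
-- raise IndexError mid-search (on some such ragged grids A still returns because the
-- short row is never reached; those are excluded with it).
def Pre_p1293 (grid : List (List Int)) (k : Int) : Prop :=
  grid ≠ [] ∧ (k ≥ (grid.length : Int) + (grid.headI.length : Int) - 2 ∨
    ∀ row ∈ grid, grid.headI.length ≤ row.length)
instance (grid : List (List Int)) (k : Int) : Decidable (Pre_p1293 grid k) := by
  unfold Pre_p1293; infer_instance

def pvWitness_p1293 : List (List Int) × Int := ([[0, 0], [0, 0]], 1)

def Spec_p1293 (grid : List (List Int)) (k : Int) (out : Int) : Prop := out = p1293_alt grid k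
instance (grid : List (List Int)) (k : Int) (out : Int) : Decidable (Spec_p1293 grid k out) := by
  unfold Spec_p1293; infer_instance

-- ===== CLAIM (what is proved, stated in full; the proofs are below) =====
def Claim_equal_p1293 : Prop := ∀ (grid : List (List Int)) (k : Int),
  Dom_p1293 grid k → Pre_p1293 grid k → Spec_p1293 grid k (p1293 grid k)


-- ===== LEMMAS AND PROOFS =====

-- Proof-side intermediate: level-synchronous BFS, linking A's queue to B's saturation.
def p1293StepB (grid : List (List Int)) (m n : Int) (c : Int × Int × Int)
    (d : Int × Int) : Option (Int × Int × Int) :=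
  let i := c.1 + d.1
  let j := c.2.1 + d.2
  if 0 ≤ i ∧ i < m ∧ 0 ≤ j ∧ j < n then
    if pvCell grid i j = 0 then some (i, j, c.2.2)
    else if c.2.2 > 0 then some (i, j, c.2.2 - 1)
    else none
  else none

def p1293NbrsB (grid : List (List Int)) (m n : Int) (c : Int × Int × Int) :
    List (Int × Int × Int) :=
  [((0:Int), (1:Int)), (0, -1), (1, 0), (-1, 0)].filterMap (p1293StepB grid m n c)

def p1293PushB (acc : PySem.Set (Int × Int × Int) × List (Int × Int × Int))
    (nb : Int × Int × Int) : PySem.Set (Int × Int × Int) × List (Int × Int × Int) :=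
  if PySem.Set.contains acc.1 nb then acc
  else (PySem.Set.add acc.1 nb, acc.2 ++ [nb])

def p1293ExpandB (grid : List (List Int)) (m n : Int)
    (acc : PySem.Set (Int × Int × Int) × List (Int × Int × Int)) (c : Int × Int × Int) :
    PySem.Set (Int × Int × Int) × List (Int × Int × Int) :=
  (p1293NbrsB grid m n c).foldl p1293PushB acc

def p1293LoopL (grid : List (List Int)) (m n : Int) :
    Nat → List (Int × Int × Int) → Int → PySem.Set (Int × Int × Int) → Int
  | 0, _, _, _ => -1
  | fuel + 1, frontier, steps, seen =>
    if frontier = [] then -1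
    else if frontier.any (fun c => decide (c.1 = m - 1 ∧ c.2.1 = n - 1)) then steps
    else
      let r := frontier.foldl (p1293ExpandB grid m n) (seen, [])
      p1293LoopL grid m n fuel r.2 (steps + 1) r.1

-- A's queue entry for the frontier cell (i, j, kk) at distance t is State(t, kk, i, j)
def pvLift (t : Int) (c : Int × Int × Int) : Int × Int × Int × Int := (t, c.2.2, c.1, c.2.1)

-- all (i, j, k') states the search can ever enqueue
def pvKl (m n k : Int) : List (Int × Int × Int) :=
  (PySem.List.pyRange 0 m 1) ×ˢ
    ((PySem.List.pyRange 0 n 1) ×ˢ (k :: PySem.List.pyRange 0 k 1))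

lemma pv_mem_pvKl (m n k : Int) (c : Int × Int × Int) :
    c ∈ pvKl m n k ↔ (0 ≤ c.1 ∧ c.1 < m ∧ 0 ≤ c.2.1 ∧ c.2.1 < n ∧
      (c.2.2 = k ∨ (0 ≤ c.2.2 ∧ c.2.2 < k))) := by
  obtain ⟨i, j, kk⟩ := c
  simp only [pvKl, List.mem_product, List.mem_cons, PySem.List.mem_pyRange_one]
  omega

lemma pv_len_pvKl (m n k : Int) :
    (pvKl m n k).length = m.toNat * (n.toNat * (k.toNat + 1)) := by
  have hlen : ∀ a : Int, (PySem.List.pyRange 0 a 1).length = a.toNat := by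
    intro a; simp only [PySem.List.pyRange]; split_ifs <;> simp <;> omega
  rw [pvKl, List.length_product, List.length_product, List.length_cons, hlen, hlen, hlen]

lemma pv_stepAB (grid : List (List Int)) (m n t : Int) (c : Int × Int × Int) (d : Int × Int) :
    p1293StepA grid m n (pvLift t c) d = (p1293StepB grid m n c d).map (pvLift (t + 1)) := by
  obtain ⟨i, j, kk⟩ := c
  simp only [p1293StepA, p1293StepB, pvLift]
  split_ifs <;> rfl

lemma pv_nbrsAB (grid : List (List Int)) (m n t : Int) (c : Int × Int × Int) :
    p1293NbrsA grid m n (pvLift t c) = (p1293NbrsB grid m n c).map (pvLift (t + 1)) := by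
  unfold p1293NbrsA p1293NbrsB
  rw [List.map_filterMap]
  exact List.filterMap_congr (fun d _ => pv_stepAB grid m n t c d)

lemma pv_foldAB (t : Int) :
    ∀ (keys : List (Int × Int × Int)) (seen : PySem.Set (Int × Int × Int))
      (base : List (Int × Int × Int × Int)) (nxt : List (Int × Int × Int)),
    (keys.map (pvLift (t + 1))).foldl p1293PushA (seen, base ++ nxt.map (pvLift (t + 1)))
      = ((keys.foldl p1293PushB (seen, nxt)).1,
         base ++ (keys.foldl p1293PushB (seen, nxt)).2.map (pvLift (t + 1))) := by
  intro keys
  induction keys with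
  | nil => intro seen base nxt; rfl
  | cons c keys ih =>
    intro seen base nxt
    obtain ⟨i, j, kk⟩ := c
    simp only [List.map_cons, List.foldl_cons]
    by_cases h : (i, j, kk) ∈ seen
    · have hA : p1293PushA (seen, base ++ nxt.map (pvLift (t + 1))) (pvLift (t + 1) (i, j, kk))
          = (seen, base ++ nxt.map (pvLift (t + 1))) := by
        simp [p1293PushA, pvLift, h]
      have hB : p1293PushB (seen, nxt) (i, j, kk) = (seen, nxt) := by
        simp [p1293PushB, h]
      rw [hA, hB]
      exact ih seen base nxt
    · have hA : p1293PushA (seen, base ++ nxt.map (pvLift (t + 1))) (pvLift (t + 1) (i, j, kk))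
          = (PySem.Set.add seen (i, j, kk),
             base ++ (nxt ++ [(i, j, kk)]).map (pvLift (t + 1))) := by
        simp [p1293PushA, pvLift, h, List.append_assoc]
      have hB : p1293PushB (seen, nxt) (i, j, kk)
          = (PySem.Set.add seen (i, j, kk), nxt ++ [(i, j, kk)]) := by
        simp [p1293PushB, h]
      rw [hA, hB]
      exact ih (PySem.Set.add seen (i, j, kk)) base (nxt ++ [(i, j, kk)])

lemma pv_levelAB (grid : List (List Int)) (m n : Int) (t : Int) :
    ∀ (pend : List (Int × Int × Int)) (fa : Nat) (nxt : List (Int × Int × Int))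
      (seen : PySem.Set (Int × Int × Int)), pend.length ≤ fa →
    p1293LoopA grid m n fa (pend.map (pvLift t) ++ nxt.map (pvLift (t + 1))) seen
      = if pend.any (fun c => decide (c.1 = m - 1 ∧ c.2.1 = n - 1)) then t
        else p1293LoopA grid m n (fa - pend.length)
              ((pend.foldl (p1293ExpandB grid m n) (seen, nxt)).2.map (pvLift (t + 1)))
              (pend.foldl (p1293ExpandB grid m n) (seen, nxt)).1 := by
  intro pend
  induction pend with
  | nil => intro fa nxt seen _; simp
  | cons c ps ih =>
    intro fa nxt seen hlen
    obtain ⟨i, j, kk⟩ := c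
    cases fa with
    | zero => simp at hlen
    | succ f =>
      have hf : ps.length ≤ f := by simpa using hlen
      simp only [List.map_cons, List.cons_append, p1293LoopA]
      by_cases hg : i = m - 1 ∧ j = n - 1
      · simp [pvLift, hg]
      · rw [if_neg (by simpa [pvLift] using hg)]
        have hexp : (p1293NbrsA grid m n (pvLift t (i, j, kk))).foldl p1293PushA
              (seen, ps.map (pvLift t) ++ nxt.map (pvLift (t + 1)))
            = ((p1293ExpandB grid m n (seen, nxt) (i, j, kk)).1,
               ps.map (pvLift t)
                 ++ (p1293ExpandB grid m n (seen, nxt) (i, j, kk)).2.map (pvLift (t + 1))) := by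
          rw [pv_nbrsAB]
          exact pv_foldAB t (p1293NbrsB grid m n (i, j, kk)) seen
            (ps.map (pvLift t)) nxt
      -- continue
        rw [hexp]
        rw [ih f (p1293ExpandB grid m n (seen, nxt) (i, j, kk)).2
              (p1293ExpandB grid m n (seen, nxt) (i, j, kk)).1 hf]
        have hd : (decide (i = m - 1 ∧ j = n - 1)) = false := by simp [hg]
        simp only [List.any_cons, hd, Bool.false_or, List.foldl_cons, List.length_cons,
          Nat.succ_sub_succ]

lemma pv_loopA_nil (grid : List (List Int)) (m n : Int) (fa : Nat)
    (seen : PySem.Set (Int × Int × Int)) : p1293LoopA grid m n fa [] seen = -1 := by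
  cases fa <;> rfl

lemma pv_loopL_nil (grid : List (List Int)) (m n : Int) (fb : Nat) (t : Int)
    (seen : PySem.Set (Int × Int × Int)) : p1293LoopL grid m n fb [] t seen = -1 := by
  cases fb <;> simp [p1293LoopL]

lemma pv_nbrsB_memK (grid : List (List Int)) (m n k : Int) (c : Int × Int × Int)
    (hc : c ∈ pvKl m n k) {nb : Int × Int × Int} (hnb : nb ∈ p1293NbrsB grid m n c) :
    nb ∈ pvKl m n k := by
  rw [pv_mem_pvKl] at hc
  unfold p1293NbrsB at hnb
  rw [List.mem_filterMap] at hnb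
  obtain ⟨d, _, hstep⟩ := hnb
  simp only [p1293StepB] at hstep
  split_ifs at hstep with h1 h2 h3
  · obtain rfl : (c.1 + d.1, c.2.1 + d.2, c.2.2) = nb := by injection hstep
    rw [pv_mem_pvKl]; dsimp only; omega
  · obtain rfl : (c.1 + d.1, c.2.1 + d.2, c.2.2 - 1) = nb := by injection hstep
    rw [pv_mem_pvKl]; dsimp only; omega

lemma pv_pushB_spec (keys : List (Int × Int × Int)) :
    ∀ (seen : PySem.Set (Int × Int × Int)) (nxt : List (Int × Int × Int)),
    seen.Nodup → (∀ c ∈ nxt, c ∈ seen) →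
    (keys.foldl p1293PushB (seen, nxt)).1.Nodup ∧
    (keys.foldl p1293PushB (seen, nxt)).1.length + nxt.length
      = seen.length + (keys.foldl p1293PushB (seen, nxt)).2.length ∧
    (∀ c ∈ (keys.foldl p1293PushB (seen, nxt)).1, c ∈ seen ∨ c ∈ keys) ∧
    (∀ c ∈ seen, c ∈ (keys.foldl p1293PushB (seen, nxt)).1) ∧
    (∀ c ∈ (keys.foldl p1293PushB (seen, nxt)).2, c ∈ (keys.foldl p1293PushB (seen, nxt)).1) := by
  induction keys with
  | nil =>
    intro seen nxt hnd hsub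
    simp only [List.foldl_nil]
    exact ⟨hnd, by simp, fun c hc => Or.inl hc, fun c hc => hc, hsub⟩
  | cons nb keys ih =>
    intro seen nxt hnd hsub
    by_cases h : nb ∈ seen
    · have hstep : p1293PushB (seen, nxt) nb = (seen, nxt) := by simp [p1293PushB, h]
      simp only [List.foldl_cons, hstep]
      obtain ⟨a, b, c, d, e⟩ := ih seen nxt hnd hsub
      exact ⟨a, b, fun x hx => (c x hx).imp id (List.mem_cons_of_mem nb), d, e⟩
    · have hstep : p1293PushB (seen, nxt) nb = (PySem.Set.add seen nb, nxt ++ [nb]) := by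
        simp [p1293PushB, h]
      simp only [List.foldl_cons, hstep]
      have hnd' : (PySem.Set.add seen nb).Nodup := by
        rw [PySem.Set.add_of_not_mem h]
        refine List.Nodup.append hnd (List.nodup_singleton _) ?_
        intro x hx hx2
        rw [List.mem_singleton] at hx2
        subst hx2; exact h hx
      have hsub' : ∀ c ∈ nxt ++ [nb], c ∈ PySem.Set.add seen nb := by
        intro c hc2
        rw [PySem.Set.mem_add]
        rcases List.mem_append.mp hc2 with hc2 | hc2
        · exact Or.inl (hsub c hc2)
        · simp at hc2; exact Or.inr hc2
      obtain ⟨a, b, c, d, e⟩ := ih (PySem.Set.add seen nb) (nxt ++ [nb]) hnd' hsub'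
      have hlen : (PySem.Set.add seen nb).length = seen.length + 1 := by
        rw [PySem.Set.add_of_not_mem h]; simp
      have hxx : (nxt ++ [nb]).length = nxt.length + 1 := by simp
      refine ⟨a, by rw [hlen, hxx] at b; omega, ?_, ?_, e⟩
      · intro x hx
        rcases c x hx with hx' | hx'
        · rcases (PySem.Set.mem_add _ _ _).mp hx' with hx'' | rfl
          · exact Or.inl hx''
          · exact Or.inr (by simp)
        · exact Or.inr (List.mem_cons_of_mem nb hx')
      · intro x hx
        exact d x ((PySem.Set.mem_add _ _ _).mpr (Or.inl hx))

lemma pv_expand_inv (grid : List (List Int)) (m n k : Int) :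
    ∀ (frontier : List (Int × Int × Int)) (seen : PySem.Set (Int × Int × Int))
      (nxt : List (Int × Int × Int)),
    seen.Nodup → (∀ c ∈ seen, c ∈ pvKl m n k) → (∀ c ∈ frontier, c ∈ pvKl m n k) →
    (∀ c ∈ nxt, c ∈ seen) →
    (frontier.foldl (p1293ExpandB grid m n) (seen, nxt)).1.Nodup ∧
    (∀ c ∈ (frontier.foldl (p1293ExpandB grid m n) (seen, nxt)).1, c ∈ pvKl m n k) ∧
    (frontier.foldl (p1293ExpandB grid m n) (seen, nxt)).1.length + nxt.length
      = seen.length + (frontier.foldl (p1293ExpandB grid m n) (seen, nxt)).2.length ∧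
    (∀ c ∈ (frontier.foldl (p1293ExpandB grid m n) (seen, nxt)).2,
        c ∈ (frontier.foldl (p1293ExpandB grid m n) (seen, nxt)).1) := by
  intro frontier
  induction frontier with
  | nil =>
    intro seen nxt hnd hK _ hsub
    simp only [List.foldl_nil]
    exact ⟨hnd, hK, by simp, hsub⟩
  | cons c fs ih =>
    intro seen nxt hnd hK hF hsub
    simp only [List.foldl_cons]
    have hcK : c ∈ pvKl m n k := hF c (by simp)
    obtain ⟨a, b, c3, d, e⟩ := pv_pushB_spec (p1293NbrsB grid m n c) seen nxt hnd hsub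
    have hK' : ∀ x ∈ (p1293ExpandB grid m n (seen, nxt) c).1, x ∈ pvKl m n k := by
      intro x hx
      rcases c3 x hx with hx' | hx'
      · exact hK x hx'
      · exact pv_nbrsB_memK grid m n k c hcK hx'
    have hF' : ∀ x ∈ fs, x ∈ pvKl m n k := fun x hx => hF x (List.mem_cons_of_mem c hx)
    have hih := ih (p1293ExpandB grid m n (seen, nxt) c).1
      (p1293ExpandB grid m n (seen, nxt) c).2 a hK' hF' e
    simp only [Prod.mk.eta] at hih
    obtain ⟨a', b', c', d'⟩ := hih
    refine ⟨a', b', ?_, d'⟩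
    have hb : (p1293ExpandB grid m n (seen, nxt) c).1.length + nxt.length
        = seen.length + (p1293ExpandB grid m n (seen, nxt) c).2.length := b
    omega

lemma pv_mainAB (grid : List (List Int)) (m n k : Int) :
    ∀ (fb fa : Nat) (frontier : List (Int × Int × Int))
      (seen : PySem.Set (Int × Int × Int)) (t : Int),
    seen.Nodup → (∀ c ∈ seen, c ∈ pvKl m n k) → (∀ c ∈ frontier, c ∈ seen) →
    frontier.length + 5 * ((pvKl m n k).length - seen.length) + 1 ≤ fa →
    ((pvKl m n k).length - seen.length) + 2 ≤ fb →
    p1293LoopA grid m n fa (frontier.map (pvLift t)) seen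
      = p1293LoopL grid m n fb frontier t seen := by
  intro fb
  induction fb with
  | zero => intro fa frontier seen t _ _ _ _ hfb; omega
  | succ f ih =>
    intro fa frontier seen t hnd hK hFS hfa hfb
    cases frontier with
    | nil => rw [List.map_nil, pv_loopA_nil, pv_loopL_nil]
    | cons c cs =>
      have hF : ∀ x ∈ c :: cs, x ∈ pvKl m n k := fun x hx => hK x (hFS x hx)
      have hlenle : (c :: cs).length ≤ fa := by omega
      have hlev := pv_levelAB grid m n t (c :: cs) fa [] seen hlenle
      rw [List.map_nil, List.append_nil] at hlev
      rw [hlev]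
      by_cases hany : ((c :: cs).any fun x => decide (x.1 = m - 1 ∧ x.2.1 = n - 1)) = true
      · rw [if_pos hany]
        simp only [p1293LoopL]
        rw [if_neg (by simp), if_pos hany]
      · rw [if_neg hany]
        simp only [p1293LoopL]
        rw [if_neg (by simp), if_neg hany]
        obtain ⟨hnd', hK', hlen', hsub'⟩ :=
          pv_expand_inv grid m n k (c :: cs) seen [] hnd hK hF (by simp)
        have hNbound : ((c :: cs).foldl (p1293ExpandB grid m n) (seen, [])).1.length
            ≤ (pvKl m n k).length :=
          (List.Nodup.subperm hnd' (fun x hx => hK' x hx)).length_le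
        by_cases hnil : ((c :: cs).foldl (p1293ExpandB grid m n) (seen, [])).2 = []
        · rw [hnil, List.map_nil, pv_loopA_nil, pv_loopL_nil]
        · have hpos : 1 ≤ ((c :: cs).foldl (p1293ExpandB grid m n) (seen, [])).2.length := by
            cases hh : ((c :: cs).foldl (p1293ExpandB grid m n) (seen, [])).2 with
            | nil => exact absurd hh hnil
            | cons x xs => simp
          apply ih
          · exact hnd'
          · exact hK'
          · exact hsub'
          · simp only [List.length_nil] at hlen'
            omega
          · simp only [List.length_nil] at hlen'
            omega

-- ===== level BFS = saturation =====

lemma pv_addNb_eq (grid : List (List Int)) (m n : Int) (acc : PySem.Set (Int × Int × Int))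
    (c : Int × Int × Int) (d : Int × Int) :
    p1293AddNbB grid m n acc c d
      = match p1293StepB grid m n c d with
        | some nb => PySem.Set.add acc nb
        | none => acc := by
  simp only [p1293AddNbB, p1293StepB]
  split_ifs <;> rfl

lemma pv_mem_dirsfold (grid : List (List Int)) (m n : Int) (c : Int × Int × Int) :
    ∀ (ds : List (Int × Int)) (acc : PySem.Set (Int × Int × Int)) (x : Int × Int × Int),
    x ∈ ds.foldl (fun a d => p1293AddNbB grid m n a c d) acc
      ↔ x ∈ acc ∨ x ∈ ds.filterMap (p1293StepB grid m n c) := by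
  intro ds
  induction ds with
  | nil => intro acc x; simp
  | cons d ds ih =>
    intro acc x
    simp only [List.foldl_cons, List.filterMap_cons]
    rw [pv_addNb_eq grid m n acc c d]
    cases hs : p1293StepB grid m n c d with
    | none => exact ih acc x
    | some nb =>
      rw [ih]
      simp only [PySem.Set.mem_add, List.mem_cons]
      tauto

lemma pv_nodup_dirsfold (grid : List (List Int)) (m n : Int) (c : Int × Int × Int) :
    ∀ (ds : List (Int × Int)) (acc : PySem.Set (Int × Int × Int)),
    acc.Nodup → (ds.foldl (fun a d => p1293AddNbB grid m n a c d) acc).Nodup := by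
  intro ds
  induction ds with
  | nil => intro acc h; exact h
  | cons d ds ih =>
    intro acc h
    simp only [List.foldl_cons]
    rw [pv_addNb_eq grid m n acc c d]
    cases hs : p1293StepB grid m n c d with
    | none => exact ih acc h
    | some nb => exact ih _ (PySem.Set.nodup_add _ _ h)

lemma pv_mem_satfold (grid : List (List Int)) (m n : Int) :
    ∀ (l : List (Int × Int × Int)) (acc : PySem.Set (Int × Int × Int)) (x : Int × Int × Int),
    x ∈ l.foldl
        (fun acc c =>
          [((0:Int), (1:Int)), (0, -1), (1, 0), (-1, 0)].foldl
            (fun a d => p1293AddNbB grid m n a c d) acc) acc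
      ↔ x ∈ acc ∨ ∃ c ∈ l, x ∈ p1293NbrsB grid m n c := by
  intro l
  induction l with
  | nil => intro acc x; simp
  | cons c l ih =>
    intro acc x
    rw [List.foldl_cons, ih]
    rw [pv_mem_dirsfold]
    simp only [List.mem_cons, p1293NbrsB]
    constructor
    · rintro ((h | h) | ⟨c', hc', h⟩)
      · exact Or.inl h
      · exact Or.inr ⟨c, Or.inl rfl, h⟩
      · exact Or.inr ⟨c', Or.inr hc', h⟩
    · rintro (h | ⟨c', (rfl | hc'), h⟩)
      · exact Or.inl (Or.inl h)
      · exact Or.inl (Or.inr h)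
      · exact Or.inr ⟨c', hc', h⟩

lemma pv_mem_sat (grid : List (List Int)) (m n : Int)
    (reach : PySem.Set (Int × Int × Int)) (x : Int × Int × Int) :
    x ∈ p1293SatStep grid m n reach
      ↔ x ∈ reach ∨ ∃ c ∈ reach, x ∈ p1293NbrsB grid m n c := by
  unfold p1293SatStep
  exact pv_mem_satfold grid m n reach reach x

lemma pv_nodup_satfold (grid : List (List Int)) (m n : Int) :
    ∀ (l : List (Int × Int × Int)) (acc : PySem.Set (Int × Int × Int)), acc.Nodup →
    (l.foldl
        (fun acc c =>
          [((0:Int), (1:Int)), (0, -1), (1, 0), (-1, 0)].foldl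
            (fun a d => p1293AddNbB grid m n a c d) acc) acc).Nodup := by
  intro l
  induction l with
  | nil => intro acc h; exact h
  | cons c l ih =>
    intro acc h
    rw [List.foldl_cons]
    exact ih _ (pv_nodup_dirsfold grid m n c _ acc h)

lemma pv_nodup_sat (grid : List (List Int)) (m n : Int)
    (reach : PySem.Set (Int × Int × Int)) (h : reach.Nodup) :
    (p1293SatStep grid m n reach).Nodup := by
  unfold p1293SatStep
  exact pv_nodup_satfold grid m n reach reach h

lemma pv_push_fold_mem1 :
    ∀ (keys : List (Int × Int × Int))
      (acc : PySem.Set (Int × Int × Int) × List (Int × Int × Int)) (x : Int × Int × Int),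
    x ∈ (keys.foldl p1293PushB acc).1 ↔ x ∈ acc.1 ∨ x ∈ keys := by
  intro keys
  induction keys with
  | nil => intro acc x; simp
  | cons nb keys ih =>
    intro acc x
    simp only [List.foldl_cons]
    rw [ih]
    by_cases h : nb ∈ acc.1
    · have : p1293PushB acc nb = acc := by simp [p1293PushB, h]
      rw [this]
      simp only [List.mem_cons]
      constructor
      · rintro (hx | hx)
        · exact Or.inl hx
        · exact Or.inr (Or.inr hx)
      · rintro (hx | rfl | hx)
        · exact Or.inl hx
        · exact Or.inl h
        · exact Or.inr hx
    · have : p1293PushB acc nb = (PySem.Set.add acc.1 nb, acc.2 ++ [nb]) := by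
        simp [p1293PushB, h]
      rw [this]
      simp only [PySem.Set.mem_add, List.mem_cons]
      tauto

lemma pv_push_fold_sub2 :
    ∀ (keys : List (Int × Int × Int))
      (acc : PySem.Set (Int × Int × Int) × List (Int × Int × Int)) (x : Int × Int × Int),
    x ∈ acc.2 → x ∈ (keys.foldl p1293PushB acc).2 := by
  intro keys
  induction keys with
  | nil => intro acc x h; exact h
  | cons nb keys ih =>
    intro acc x h
    simp only [List.foldl_cons]
    apply ih
    simp only [p1293PushB]
    split_ifs
    · exact h
    · exact List.mem_append.mpr (Or.inl h)

lemma pv_push_fold_mem2 :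
    ∀ (keys : List (Int × Int × Int))
      (acc : PySem.Set (Int × Int × Int) × List (Int × Int × Int)) (x : Int × Int × Int),
    x ∈ (keys.foldl p1293PushB acc).2 → x ∈ acc.2 ∨ x ∉ acc.1 := by
  intro keys
  induction keys with
  | nil => intro acc x h; exact Or.inl h
  | cons nb keys ih =>
    intro acc x h
    simp only [List.foldl_cons] at h
    by_cases hm : nb ∈ acc.1
    · have : p1293PushB acc nb = acc := by simp [p1293PushB, hm]
      rw [this] at h
      exact ih acc x h
    · have : p1293PushB acc nb = (PySem.Set.add acc.1 nb, acc.2 ++ [nb]) := by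
        simp [p1293PushB, hm]
      rw [this] at h
      rcases ih _ x h with hx | hx
      · rcases List.mem_append.mp hx with hx | hx
        · exact Or.inl hx
        · simp only [List.mem_singleton] at hx
          subst hx; exact Or.inr hm
      · simp only [PySem.Set.mem_add, not_or] at hx
        exact Or.inr hx.1

lemma pv_push_fold_mem3 :
    ∀ (keys : List (Int × Int × Int))
      (acc : PySem.Set (Int × Int × Int) × List (Int × Int × Int)),
    (∀ y ∈ acc.2, y ∈ acc.1) →
    ∀ x, x ∈ (keys.foldl p1293PushB acc).1 ↔ x ∈ acc.1 ∨ x ∈ (keys.foldl p1293PushB acc).2 := by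
  intro keys
  induction keys with
  | nil =>
    intro acc hsub x
    simp only [List.foldl_nil]
    exact ⟨Or.inl, fun h => h.elim id (hsub x)⟩
  | cons nb keys ih =>
    intro acc hsub x
    simp only [List.foldl_cons]
    by_cases hm : nb ∈ acc.1
    · have he : p1293PushB acc nb = acc := by simp [p1293PushB, hm]
      rw [he]
      exact ih acc hsub x
    · have he : p1293PushB acc nb = (PySem.Set.add acc.1 nb, acc.2 ++ [nb]) := by
        simp [p1293PushB, hm]
      rw [he]
      have hsub' : ∀ y ∈ (PySem.Set.add acc.1 nb, acc.2 ++ [nb]).2,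
          y ∈ (PySem.Set.add acc.1 nb, acc.2 ++ [nb]).1 := by
        intro y hy
        rcases List.mem_append.mp hy with hy | hy
        · exact (PySem.Set.mem_add _ _ _).mpr (Or.inl (hsub y hy))
        · simp only [List.mem_singleton] at hy
          subst hy; exact (PySem.Set.mem_add _ _ _).mpr (Or.inr rfl)
      rw [ih _ hsub' x]
      have hnb2 : nb ∈ (keys.foldl p1293PushB (PySem.Set.add acc.1 nb, acc.2 ++ [nb])).2 :=
        pv_push_fold_sub2 keys _ nb (List.mem_append.mpr (Or.inr (by simp)))
      simp only [PySem.Set.mem_add]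
      constructor
      · rintro ((h | rfl) | h)
        · exact Or.inl h
        · exact Or.inr hnb2
        · exact Or.inr h
      · rintro (h | h)
        · exact Or.inl (Or.inl h)
        · exact Or.inr h

lemma pv_expand_mem1 (grid : List (List Int)) (m n : Int) :
    ∀ (frontier : List (Int × Int × Int))
      (acc : PySem.Set (Int × Int × Int) × List (Int × Int × Int)) (x : Int × Int × Int),
    x ∈ (frontier.foldl (p1293ExpandB grid m n) acc).1
      ↔ x ∈ acc.1 ∨ ∃ c ∈ frontier, x ∈ p1293NbrsB grid m n c := by
  intro frontier
  induction frontier with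
  | nil => intro acc x; simp
  | cons c fs ih =>
    intro acc x
    simp only [List.foldl_cons]
    rw [ih]
    unfold p1293ExpandB
    rw [pv_push_fold_mem1]
    simp only [List.mem_cons]
    constructor
    · rintro ((h | h) | ⟨c', hc', h⟩)
      · exact Or.inl h
      · exact Or.inr ⟨c, Or.inl rfl, h⟩
      · exact Or.inr ⟨c', Or.inr hc', h⟩
    · rintro (h | ⟨c', (rfl | hc'), h⟩)
      · exact Or.inl (Or.inl h)
      · exact Or.inl (Or.inr h)
      · exact Or.inr ⟨c', hc', h⟩

lemma pv_expand_mem2 (grid : List (List Int)) (m n : Int) :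
    ∀ (frontier : List (Int × Int × Int))
      (acc : PySem.Set (Int × Int × Int) × List (Int × Int × Int)) (x : Int × Int × Int),
    x ∈ (frontier.foldl (p1293ExpandB grid m n) acc).2 → x ∈ acc.2 ∨ x ∉ acc.1 := by
  intro frontier
  induction frontier with
  | nil => intro acc x h; exact Or.inl h
  | cons c fs ih =>
    intro acc x h
    simp only [List.foldl_cons] at h
    rcases ih _ x h with hx | hx
    · unfold p1293ExpandB at hx
      rcases pv_push_fold_mem2 _ acc x hx with hx' | hx'
      · exact Or.inl hx'
      · exact Or.inr hx'
    · unfold p1293ExpandB at hx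
      rw [pv_push_fold_mem1] at hx
      rw [not_or] at hx
      exact Or.inr hx.1

lemma pv_expand_sub2 (grid : List (List Int)) (m n : Int) :
    ∀ (frontier : List (Int × Int × Int))
      (acc : PySem.Set (Int × Int × Int) × List (Int × Int × Int)) (x : Int × Int × Int),
    x ∈ acc.2 → x ∈ (frontier.foldl (p1293ExpandB grid m n) acc).2 := by
  intro frontier
  induction frontier with
  | nil => intro acc x h; exact h
  | cons c fs ih =>
    intro acc x h
    simp only [List.foldl_cons]
    exact ih _ x (pv_push_fold_sub2 _ acc x h)

lemma pv_expand_mem3 (grid : List (List Int)) (m n : Int) :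
    ∀ (frontier : List (Int × Int × Int))
      (acc : PySem.Set (Int × Int × Int) × List (Int × Int × Int)),
    (∀ y ∈ acc.2, y ∈ acc.1) →
    ∀ x, x ∈ (frontier.foldl (p1293ExpandB grid m n) acc).1
      ↔ x ∈ acc.1 ∨ x ∈ (frontier.foldl (p1293ExpandB grid m n) acc).2 := by
  intro frontier
  induction frontier with
  | nil =>
    intro acc hsub x
    simp only [List.foldl_nil]
    exact ⟨Or.inl, fun h => h.elim id (hsub x)⟩
  | cons c fs ih =>
    intro acc hsub x
    simp only [List.foldl_cons]
    have hsub' : ∀ y ∈ (p1293ExpandB grid m n acc c).2, y ∈ (p1293ExpandB grid m n acc c).1 := by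
      intro y hy
      unfold p1293ExpandB at hy ⊢
      rw [pv_push_fold_mem3 _ acc hsub y]
      exact Or.inr hy
    rw [ih _ hsub' x]
    unfold p1293ExpandB
    rw [pv_push_fold_mem3 _ acc hsub x]
    constructor
    · rintro ((h | h) | h)
      · exact Or.inl h
      · exact Or.inr (pv_expand_sub2 grid m n fs _ x h)
      · exact Or.inr h
    · rintro (h | h)
      · exact Or.inl (Or.inl h)
      · exact Or.inr h

lemma pv_levelSat (grid : List (List Int)) (m n k : Int) :
    ∀ (f : Nat) (frontier : List (Int × Int × Int))
      (seen reach : PySem.Set (Int × Int × Int)) (t : Int),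
    seen.Nodup → reach.Nodup →
    (∀ x, x ∈ seen ↔ x ∈ reach) →
    (∀ c ∈ frontier, c ∈ seen) →
    (∀ g ∈ seen, g.1 = m - 1 ∧ g.2.1 = n - 1 → g ∈ frontier) →
    (∀ s ∈ seen, s ∉ frontier → ∀ nb ∈ p1293NbrsB grid m n s, nb ∈ seen) →
    (∀ c ∈ seen, c ∈ pvKl m n k) →
    ((pvKl m n k).length - reach.length) + 2 ≤ f →
    p1293LoopL grid m n f frontier t seen = p1293LoopS grid m n f reach t := by
  intro f
  induction f with
  | zero => intro frontier seen reach t _ _ _ _ _ _ _ hf; omega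
  | succ f ih =>
    intro frontier seen reach t h1 h2 h3 h4 h5 h6 h7 hf
    have hanyL : (frontier.any (fun c => decide (c.1 = m - 1 ∧ c.2.1 = n - 1)))
        = (reach.any (fun c => decide (c.1 = m - 1 ∧ c.2.1 = n - 1))) := by
      rw [Bool.eq_iff_iff]
      simp only [List.any_eq_true, decide_eq_true_eq]
      constructor
      · rintro ⟨g, hg, hp⟩; exact ⟨g, (h3 g).mp (h4 g hg), hp⟩
      · rintro ⟨g, hg, hp⟩; exact ⟨g, h5 g ((h3 g).mpr hg) hp, hp⟩
    by_cases hnil : frontier = []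
    · subst hnil
      have hanyR : (reach.any (fun c => decide (c.1 = m - 1 ∧ c.2.1 = n - 1))) = false := by
        rw [← hanyL]; rfl
      simp only [p1293LoopL, p1293LoopS]
      rw [if_pos trivial, if_neg (by rw [hanyR]; exact Bool.false_ne_true)]
      have hEq : PySem.Set.equal (p1293SatStep grid m n reach) reach = true := by
        rw [PySem.Set.equal_iff]
        intro x
        rw [pv_mem_sat]
        constructor
        · rintro (hx | ⟨c, hc, hnb⟩)
          · exact hx
          · exact (h3 x).mp (h6 c ((h3 c).mpr hc) (by simp) x hnb)
        · exact fun hx => Or.inl hx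
      rw [if_pos hEq]
    · simp only [p1293LoopL, p1293LoopS]
      rw [if_neg hnil]
      by_cases hany : (frontier.any (fun c => decide (c.1 = m - 1 ∧ c.2.1 = n - 1))) = true
      · rw [if_pos hany, if_pos (hanyL ▸ hany)]
      · rw [if_neg hany, if_neg (hanyL ▸ hany)]
        have hFK : ∀ c ∈ frontier, c ∈ pvKl m n k := fun c hc => h7 c (h4 c hc)
        obtain ⟨hnd', hK', hlen', hsub'⟩ :=
          pv_expand_inv grid m n k frontier seen [] h1 h7 hFK (by simp)
        have mem1 := pv_expand_mem1 grid m n frontier (seen, [])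
        have mem2 := pv_expand_mem2 grid m n frontier (seen, [])
        have mem3 := pv_expand_mem3 grid m n frontier (seen, []) (by simp)
        have hNew : ∀ x, x ∈ p1293SatStep grid m n reach
            ↔ x ∈ (frontier.foldl (p1293ExpandB grid m n) (seen, [])).1 := by
          intro x
          rw [pv_mem_sat, mem1 x]
          constructor
          · rintro (hx | ⟨c, hc, hnb⟩)
            · exact Or.inl ((h3 x).mpr hx)
            · by_cases hcf : c ∈ frontier
              · exact Or.inr ⟨c, hcf, hnb⟩
              · exact Or.inl (h6 c ((h3 c).mpr hc) hcf x hnb)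
          · rintro (hx | ⟨c, hc, hnb⟩)
            · exact Or.inl ((h3 x).mp hx)
            · exact Or.inr ⟨c, (h3 c).mp (h4 c hc), hnb⟩
        by_cases hr2 : (frontier.foldl (p1293ExpandB grid m n) (seen, [])).2 = []
        · have hEq : PySem.Set.equal (p1293SatStep grid m n reach) reach = true := by
            rw [PySem.Set.equal_iff]
            intro x
            rw [hNew x, mem3 x, hr2]
            simp only [List.not_mem_nil, or_false]
            exact h3 x
          rw [if_pos hEq, hr2, pv_loopL_nil]
        · obtain ⟨x, hx2⟩ := List.exists_mem_of_ne_nil _ hr2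
          have hxs : x ∉ seen := by
            rcases mem2 x hx2 with h | h
            · simp at h
            · exact h
          have hx1 : x ∈ (frontier.foldl (p1293ExpandB grid m n) (seen, [])).1 := hsub' x hx2
          have hxnew : x ∈ p1293SatStep grid m n reach := (hNew x).mpr hx1
          have hxreach : x ∉ reach := fun h => hxs ((h3 x).mpr h)
          have hEq : PySem.Set.equal (p1293SatStep grid m n reach) reach = false :=
            Bool.eq_false_iff.mpr
              (fun h => hxreach (((PySem.Set.equal_iff _ _).mp h x).mp hxnew))
          rw [if_neg (by rw [hEq]; exact Bool.false_ne_true)]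
          have hgrow : reach.length + 1 ≤ (p1293SatStep grid m n reach).length := by
            have hnd2 : (reach ++ [x]).Nodup := by
              refine List.Nodup.append h2 (List.nodup_singleton _) ?_
              intro y hy hy2
              rw [List.mem_singleton] at hy2
              subst hy2; exact hxreach hy
            have hsubl : ∀ y ∈ reach ++ [x], y ∈ p1293SatStep grid m n reach := by
              intro y hy
              rcases List.mem_append.mp hy with hy | hy
              · exact (pv_mem_sat grid m n reach y).mpr (Or.inl hy)
              · rw [List.mem_singleton] at hy; subst hy; exact hxnew
            have := (List.Nodup.subperm hnd2 hsubl).length_le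
            simpa using this
          have hnewle : (p1293SatStep grid m n reach).length ≤ (pvKl m n k).length :=
            (List.Nodup.subperm (pv_nodup_sat grid m n reach h2)
              (fun y hy => hK' y ((hNew y).mp hy))).length_le
          apply ih
          · exact hnd'
          · exact pv_nodup_sat grid m n reach h2
          · exact fun y => (hNew y).symm
          · exact hsub'
          · intro g hg hp
            rcases (mem3 g).mp hg with hgs | hgr
            · exact absurd (List.any_eq_true.mpr ⟨g, h5 g hgs hp, by simp [hp.1, hp.2]⟩) hany
            · exact hgr
          · intro s hs hsf nb hnb
            rcases (mem3 s).mp hs with hss | hsr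
            · by_cases hcf : s ∈ frontier
              · exact (mem1 nb).mpr (Or.inr ⟨s, hcf, hnb⟩)
              · exact (mem1 nb).mpr (Or.inl (h6 s hss hcf nb hnb))
            · exact absurd hsr hsf
          · exact hK'
          · omega

-- ===== VERDICT (by name: the statement is the Claim_ definition above) =====
theorem p1293_spec : Claim_equal_p1293 := by
  intro grid k hdom hpre
  obtain ⟨hne, -⟩ := hpre
  have hm1 : 1 ≤ grid.length := List.length_pos_iff.mpr hne
  unfold Spec_p1293
  simp only [p1293, p1293_alt]
  by_cases hk : k ≥ (grid.length : Int) + (grid.headI.length : Int) - 2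
  · rw [if_pos hk, if_pos hk]
  · rw [if_neg hk, if_neg hk]
    by_cases hn0 : grid.headI.length = 0
    · -- row 0 is empty: no cell is ever a goal or a neighbour, both loops return -1
      simp only [hn0, Nat.cast_zero, mul_zero, zero_mul, zero_add]
      have hsA : ∀ d ∈ [((0:Int), (1:Int)), (0, -1), (1, 0), (-1, 0)],
          p1293StepA grid (grid.length : Int) 0 (0, k, 0, 0) d = none := by
        intro d hd
        fin_cases hd <;>
          (simp only [p1293StepA]; rw [if_neg (by intro hcon; simp at hcon; try omega)])
      have hsB : ∀ d ∈ [((0:Int), (1:Int)), (0, -1), (1, 0), (-1, 0)],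
          p1293StepB grid (grid.length : Int) 0 ((0:Int), (0:Int), k) d = none := by
        intro d hd
        fin_cases hd <;>
          (simp only [p1293StepB]; rw [if_neg (by intro hcon; simp at hcon; try omega)])
      have hnbA : p1293NbrsA grid (grid.length : Int) 0 ((0:Int), k, (0:Int), (0:Int)) = [] := by
        unfold p1293NbrsA
        exact List.filterMap_eq_nil_iff.mpr hsA
      have hnbB : p1293NbrsB grid (grid.length : Int) 0 ((0:Int), (0:Int), k) = [] := by
        unfold p1293NbrsB
        exact List.filterMap_eq_nil_iff.mpr hsB
      have hA : p1293LoopA grid (grid.length : Int) 0 2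
          [((0:Int), k, (0:Int), (0:Int))]
          (PySem.Set.ofList [((0:Int), (0:Int), k)]) = -1 := by
        rw [show (2 : Nat) = 1 + 1 from rfl]
        simp only [p1293LoopA]
        rw [if_neg (by intro hcon; simp at hcon; try omega)]
        rw [hnbA]
        simp only [List.foldl_nil]
        exact pv_loopA_nil _ _ _ _ _
      have hS : p1293LoopS grid (grid.length : Int) 0 2
          (PySem.Set.ofList [((0:Int), (0:Int), k)]) 0 = -1 := by
        rw [show (2 : Nat) = 1 + 1 from rfl]
        simp only [p1293LoopS]
        rw [if_neg (by simp [PySem.Set.ofList])]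
        have hEq : PySem.Set.equal
            (p1293SatStep grid (grid.length : Int) 0 (PySem.Set.ofList [((0:Int), (0:Int), k)]))
            (PySem.Set.ofList [((0:Int), (0:Int), k)]) = true := by
          rw [PySem.Set.equal_iff]
          intro y
          rw [pv_mem_sat]
          constructor
          · rintro (hy | ⟨c, hc, hnb⟩)
            · exact hy
            · have hc' : c = ((0:Int), (0:Int), k) := by
                simpa [PySem.Set.ofList] using hc
              subst hc'
              rw [hnbB] at hnb
              simp at hnb
          · exact fun hy => Or.inl hy
        rw [if_pos hEq]
      rw [hA, hS]
    · have hstart : ((0 : Int), (0 : Int), k)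
          ∈ pvKl (grid.length : Int) (grid.headI.length : Int) k := by
        rw [pv_mem_pvKl]
        dsimp only
        refine ⟨le_refl 0, by omega, le_refl 0, by omega, Or.inl rfl⟩
      have hNval : (pvKl (grid.length : Int) (grid.headI.length : Int) k).length
          = grid.length * (grid.headI.length * (k.toNat + 1)) := by
        rw [pv_len_pvKl]; simp
      have hmain := pv_mainAB grid (grid.length : Int) (grid.headI.length : Int) k
        (grid.length * (grid.headI.length * (k.toNat + 1)) + 2)
        (5 * (grid.length * (grid.headI.length * (k.toNat + 1))) + 2)
        [((0:Int), (0:Int), k)]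
        (PySem.Set.ofList [((0:Int), (0:Int), k)]) 0
        (by simp [PySem.Set.ofList])
        (by intro c hc; simp [PySem.Set.ofList] at hc; subst hc; exact hstart)
        (by intro c hc; simpa [PySem.Set.ofList] using hc)
        (by simp only [List.length_cons, List.length_nil, PySem.Set.ofList]; omega)
        (by simp only [PySem.Set.ofList]; omega)
      simp only [List.map_cons, List.map_nil, pvLift] at hmain
      rw [hmain]
      apply pv_levelSat grid (grid.length : Int) (grid.headI.length : Int) k
        (grid.length * (grid.headI.length * (k.toNat + 1)) + 2)
        [((0:Int), (0:Int), k)]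
        (PySem.Set.ofList [((0:Int), (0:Int), k)])
        (PySem.Set.ofList [((0:Int), (0:Int), k)]) 0
      · simp [PySem.Set.ofList]
      · simp [PySem.Set.ofList]
      · exact fun x => Iff.rfl
      · intro c hc; simpa [PySem.Set.ofList] using hc
      · intro g hg _; simpa [PySem.Set.ofList] using hg
      · intro s hs hsf
        exfalso
        exact hsf (by simpa [PySem.Set.ofList] using hs)
      · intro c hc; simp [PySem.Set.ofList] at hc; subst hc; exact hstart
      · simp only [PySem.Set.ofList]
        omega
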